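-- pv_equiv track=rewrite | github.com/ArcadeHustle/WatermelonPapriumDump | ChipWhisperer/Paprium_STM32_Glitch_CW.py | read_and_convert_data_hex_file
-- ===== SOURCE A (Python) =====
-- def int2str_0xFF(int_number, number_of_bytes):
--     return '{0:0{1}X}'.format(int_number,number_of_bytes)
--
-- def read_and_convert_data_hex_file(data_to_convert, memory_address, mem_step):
--     addr_string = memory_address -((memory_address >> 20) << 20)
--
--     data_buffer = ''
--     crcacc = 0
--     for x in range(0, len(data_to_convert)):
--         data_buffer += int2str_0xFF(data_to_convert[x], 2)
--         crcacc += data_to_convert[x]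
--
--     crcacc += mem_step
--
--     temp_addr_string = addr_string
--     for i in range (4, -1, -2):
--         crcacc += temp_addr_string >> i*4
--         temp_addr_string -= ((temp_addr_string >> i*4) << i*4)
--
--     crcacc_2nd_symbol = (crcacc >> 8) + 1
--     crcacc = (crcacc_2nd_symbol << 8) - crcacc
--     if crcacc == 0x100:
--         crcacc = 0
--     RECTYP = 0x00
-- #    out_string = ':'+ Int_To_Hex_String(mem_step, 2)  +\
-- #        Int_To_Hex_String((addr_string),4) +\
-- #        Int_To_Hex_String(RECTYP, 2) +\
-- #        data_buffer +\
-- #        Int_To_Hex_String(crcacc, 2)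
--     out_string = ':'+ hex(mem_step)  +\
--         hex(addr_string) +\
--         hex(RECTYP) +\
--         data_buffer +\
--         hex(crcacc)
--     return out_string
-- ===== SOURCE B (Python) =====
-- def _hexsum(data, lo, hi):
--     # divide and conquer over data[lo:hi]: returns (hex text, arithmetic sum)
--     if hi - lo == 0:
--         return '', 0
--     if hi - lo == 1:
--         b = data[lo]
--         return '{:02X}'.format(b), b
--     mid = (lo + hi) // 2
--     s1, c1 = _hexsum(data, lo, mid)
--     s2, c2 = _hexsum(data, mid, hi)
--     return s1 + s2, c1 + c2
--
-- def read_and_convert_data_hex_file(data_to_convert, memory_address, mem_step):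
--     addr = memory_address % 0x100000
--     data_buffer, total = _hexsum(data_to_convert, 0, len(data_to_convert))
--     total += mem_step + (addr >> 16) + ((addr >> 8) & 0xFF) + (addr & 0xFF)
--     return ':' + hex(mem_step) + hex(addr) + hex(0) + data_buffer + hex(-total % 0x100)
-- ===== Notes on version B (the rewrite author's own statement) =====
-- stated objective: alternative
-- what changed: B formats and sums the data by a divide-and-conquer recursion (_hexsum splits the index range in half and combines (text, sum) pairs) instead of A's fused left-to-right index loop, replaces the subtract-and-shift address loop with the closed-form byte decomposition of memory_address % 0x100000, and collapses A's shift/carry/reset checksum finale into -total % 0x100.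
import Mathlib
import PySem

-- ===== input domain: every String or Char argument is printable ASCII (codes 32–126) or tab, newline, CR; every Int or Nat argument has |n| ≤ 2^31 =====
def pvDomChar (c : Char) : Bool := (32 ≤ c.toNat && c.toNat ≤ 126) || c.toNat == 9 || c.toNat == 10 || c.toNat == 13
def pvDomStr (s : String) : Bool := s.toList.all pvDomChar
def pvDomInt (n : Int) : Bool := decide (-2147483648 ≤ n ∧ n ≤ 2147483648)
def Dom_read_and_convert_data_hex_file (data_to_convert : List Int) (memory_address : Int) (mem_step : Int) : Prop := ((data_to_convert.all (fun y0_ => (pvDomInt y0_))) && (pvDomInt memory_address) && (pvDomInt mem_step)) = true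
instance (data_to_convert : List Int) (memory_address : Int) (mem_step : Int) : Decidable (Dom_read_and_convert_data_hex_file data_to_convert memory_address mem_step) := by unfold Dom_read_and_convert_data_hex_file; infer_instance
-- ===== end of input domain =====

-- B replaces A's fused index loop by a divide-and-conquer (text, sum) recursion, the
-- subtract-and-shift address loop by a closed-form byte decomposition, and the
-- shift/carry/reset checksum finale by -total % 0x100 (alternative structure, same cost).

-- ===== PORT A =====
-- shared helpers for Python's hex-formatting built-ins (used by both ports):
-- fmt02X n = '{0:0{1}X}'.format(n, 2) / '{:02X}'.format(n)  (uppercase hex, zero-padded to width 2, sign counts in the width)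
def fmt02X (n : Int) : String :=
  if n < 0 then String.ofList ('-' :: List.leftpad 1 '0' ((Nat.toDigits 16 (-n).toNat).map Char.toUpper))
  else String.ofList (List.leftpad 2 '0' ((Nat.toDigits 16 n.toNat).map Char.toUpper))

-- pyHex n = hex(n)  ("0x…" lowercase, "-0x…" for negatives)
def pyHex (n : Int) : String :=
  if n < 0 then String.ofList ('-' :: '0' :: 'x' :: Nat.toDigits 16 (-n).toNat)
  else String.ofList ('0' :: 'x' :: Nat.toDigits 16 n.toNat)

-- Python 'x >> k' (k ≥ 0) is floor division by 2^k and 'x << k' is multiplication by 2^k: exact.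
def read_and_convert_data_hex_file (data_to_convert : List Int) (memory_address : Int) (mem_step : Int) : String :=
  let addr_string := memory_address - (PySem.Int.floordiv memory_address 1048576) * 1048576
  -- the data loop: index x always in range, so pyGetD with default 0 is exact
  let st := (PySem.List.pyRange 0 (data_to_convert.length : Int) 1).foldl
      (fun (st : String × Int) x =>
        (st.1 ++ fmt02X (PySem.List.pyGetD data_to_convert x 0),
         st.2 + PySem.List.pyGetD data_to_convert x 0)) ("", 0)
  let data_buffer := st.1
  let crcacc := st.2 + mem_step
  let fin := (PySem.List.pyRange 4 (-1) (-2)).foldl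
      (fun (st : Int × Int) i =>
        (st.1 + PySem.Int.floordiv st.2 (2 ^ (i * 4).toNat),
         st.2 - (PySem.Int.floordiv st.2 (2 ^ (i * 4).toNat)) * 2 ^ (i * 4).toNat))
      (crcacc, addr_string)
  let crcacc := fin.1
  let crcacc_2nd_symbol := PySem.Int.floordiv crcacc 256 + 1
  let crcacc := crcacc_2nd_symbol * 256 - crcacc
  let crcacc := if crcacc = 256 then 0 else crcacc
  ":" ++ pyHex mem_step ++ pyHex addr_string ++ pyHex 0 ++ data_buffer ++ pyHex crcacc

-- ===== PORT B =====
-- _hexsum: divide and conquer over data[lo:hi]; the 'hi - lo ≤ 0' guard only totalises the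
-- function (Python's '== 0' test; ranges with hi < lo are never reached from the entry point).
-- data[lo] with lo always in range → pyGetD exact; (lo+hi)//2 → floordiv.
def hexsumB (data : List Int) (lo hi : Int) : String × Int :=
  if hi - lo ≤ 0 then ("", 0)
  else if hi - lo = 1 then (fmt02X (PySem.List.pyGetD data lo 0), PySem.List.pyGetD data lo 0)
  else
    let p1 := hexsumB data lo (PySem.Int.floordiv (lo + hi) 2)
    let p2 := hexsumB data (PySem.Int.floordiv (lo + hi) 2) hi
    (p1.1 ++ p2.1, p1.2 + p2.2)
termination_by (hi - lo).toNat
decreasing_by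
  all_goals rw [PySem.Int.floordiv_eq_ediv_of_pos (by norm_num : (0:Int) < 2)]
  all_goals omega

-- 'x % 0x100000' → PySem.Int.mod; '(x >> 8) & 0xFF' = (x // 256) % 256 (power-of-two mask on
-- Python ints IS the floor remainder: exact); '-total % 0x100' → PySem.Int.mod (-total) 256.
def read_and_convert_data_hex_file_alt (data_to_convert : List Int) (memory_address : Int) (mem_step : Int) : String :=
  let addr := PySem.Int.mod memory_address 1048576
  let p := hexsumB data_to_convert 0 (data_to_convert.length : Int)
  let total := p.2 + (mem_step + PySem.Int.floordiv addr 65536 +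
      PySem.Int.mod (PySem.Int.floordiv addr 256) 256 + PySem.Int.mod addr 256)
  ":" ++ pyHex mem_step ++ pyHex addr ++ pyHex 0 ++ p.1 ++ pyHex (PySem.Int.mod (-total) 256)

-- ===== PRECONDITION & SPEC =====
def Spec_read_and_convert_data_hex_file (data_to_convert : List Int) (memory_address : Int) (mem_step : Int) (out : String) : Prop := out = read_and_convert_data_hex_file_alt data_to_convert memory_address mem_step
instance (data_to_convert : List Int) (memory_address : Int) (mem_step : Int) (out : String) : Decidable (Spec_read_and_convert_data_hex_file data_to_convert memory_address mem_step out) := by unfold Spec_read_and_convert_data_hex_file; infer_instance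

-- ===== CLAIM (what is proved, stated in full; the proofs are below) =====
def Claim_equal_read_and_convert_data_hex_file : Prop := ∀ (data_to_convert : List Int) (memory_address : Int) (mem_step : Int), Dom_read_and_convert_data_hex_file data_to_convert memory_address mem_step → Spec_read_and_convert_data_hex_file data_to_convert memory_address mem_step (read_and_convert_data_hex_file data_to_convert memory_address mem_step)

-- ===== LEMMAS AND PROOFS =====
theorem strFoldl_eq (l : List String) (b : String) :
    l.foldl (fun r s => r ++ s) b = b ++ l.foldl (fun r s => r ++ s) "" := by
  induction l generalizing b with
  | nil => simp
  | cons x t ih =>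
      simp only [List.foldl_cons]
      rw [ih (b ++ x), ih ("" ++ x)]
      simp [String.append_assoc]

theorem joinStr_append (l1 l2 : List String) :
    String.join (l1 ++ l2) = String.join l1 ++ String.join l2 := by
  show (l1 ++ l2).foldl (fun r s => r ++ s) "" = _
  rw [List.foldl_append, strFoldl_eq]
  rfl

-- A's fused data loop computes (hex buffer, running sum)
theorem dataLoop_eq (xs : List Int) (s : String) (a : Int) :
    xs.foldl (fun (st : String × Int) v => (st.1 ++ fmt02X v, st.2 + v)) (s, a)
      = (s ++ String.join (xs.map fmt02X), a + xs.sum) := by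
  induction xs generalizing s a with
  | nil => simp [String.join]
  | cons x t ih =>
      simp only [List.foldl_cons, ih, List.map_cons, List.sum_cons]
      refine Prod.ext ?_ (by ring)
      show s ++ fmt02X x ++ String.join (t.map fmt02X) = s ++ String.join (fmt02X x :: t.map fmt02X)
      show s ++ fmt02X x ++ String.join (t.map fmt02X)
        = s ++ (t.map fmt02X).foldl (fun r s => r ++ s) ("" ++ fmt02X x)
      rw [strFoldl_eq (t.map fmt02X) ("" ++ fmt02X x)]
      simp [String.append_assoc, String.join]

-- B's divide-and-conquer computes the same (hex text, sum) on any in-range segment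
theorem hexsumB_eq (data : List Int) (n : Nat) : ∀ (lo hi : Int), 0 ≤ lo → lo ≤ hi →
    hi ≤ (data.length : Int) → (hi - lo).toNat = n →
    hexsumB data lo hi = (String.join (((data.drop lo.toNat).take n).map fmt02X),
                          ((data.drop lo.toNat).take n).sum) := by
  induction n using Nat.strong_induction_on with
  | _ n ih =>
    intro lo hi h0 h1 h2 hn
    rcases Nat.lt_or_ge n 2 with hsmall | hbig
    · interval_cases n
      · rw [hexsumB]
        simp only [if_pos (by omega : hi - lo ≤ 0)]
        simp [String.join]
      · rw [hexsumB]
        rw [if_neg (by omega), if_pos (by omega : hi - lo = 1)]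
        have hlt : lo.toNat < data.length := by omega
        have hd : (data.drop lo.toNat).take 1 = [data[lo.toNat]] := by
          rw [List.drop_eq_getElem_cons hlt]; rfl
        rw [PySem.List.pyGetD_eq_getElem data 0 h0 (by omega), hd]
        simp [String.join]
    · rw [hexsumB]
      rw [if_neg (by omega), if_neg (by omega)]
      have hdpos : (0:Int) < 2 := by norm_num
      set mid := PySem.Int.floordiv (lo + hi) 2 with hmid
      have hmide : mid = (lo + hi) / 2 := by rw [hmid, PySem.Int.floordiv_eq_ediv_of_pos hdpos]
      have hb1 : lo ≤ mid := by omega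
      have hb2 : mid ≤ hi := by omega
      have hlt1 : (mid - lo).toNat < n := by omega
      have hlt2 : (hi - mid).toNat < n := by omega
      rw [ih _ hlt1 lo mid h0 hb1 (by omega) rfl,
          ih _ hlt2 mid hi (by omega) hb2 h2 rfl]
      have hsplit : (data.drop lo.toNat).take n
          = (data.drop lo.toNat).take (mid - lo).toNat ++ (data.drop mid.toNat).take (hi - mid).toNat := by
        have : n = (mid - lo).toNat + (hi - mid).toNat := by omega
        rw [this, List.take_add, List.drop_drop]
        have : lo.toNat + (mid - lo).toNat = mid.toNat := by omega
        rw [this]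
      rw [hsplit, List.map_append, joinStr_append, List.sum_append]

theorem addr_eq (m : Int) : m - (PySem.Int.floordiv m 1048576) * 1048576 = PySem.Int.mod m 1048576 := by
  have h := PySem.Int.floordiv_mul_add_mod m 1048576
  omega

-- A's 3-step subtract-and-shift address loop adds the three address bytes
theorem addrLoop_eq (c a : Int) :
    ((PySem.List.pyRange 4 (-1) (-2)).foldl
      (fun (st : Int × Int) i =>
        (st.1 + PySem.Int.floordiv st.2 (2 ^ (i * 4).toNat),
         st.2 - (PySem.Int.floordiv st.2 (2 ^ (i * 4).toNat)) * 2 ^ (i * 4).toNat))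
      (c, a)).1
      = c + (PySem.Int.floordiv a 65536 +
          PySem.Int.mod (PySem.Int.floordiv a 256) 256 + PySem.Int.mod a 256) := by
  have hr : PySem.List.pyRange 4 (-1) (-2) = [4, 2, 0] := by decide
  rw [hr]
  simp only [List.foldl_cons, List.foldl_nil]
  have e16 : (2:Int) ^ (((4:Int)) * 4).toNat = 65536 := by decide
  have e8 : (2:Int) ^ (((2:Int)) * 4).toNat = 256 := by decide
  have e0 : (2:Int) ^ (((0:Int)) * 4).toNat = 1 := by decide
  simp only [e16, e8, e0]
  simp only [PySem.Int.floordiv_eq_ediv_of_pos (show (0:Int) < 65536 by norm_num),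
             PySem.Int.floordiv_eq_ediv_of_pos (show (0:Int) < 256 by norm_num),
             PySem.Int.floordiv_eq_ediv_of_pos (show (0:Int) < 1 by norm_num),
             PySem.Int.mod_eq_emod_of_pos (show (0:Int) < 256 by norm_num)]
  omega

-- A's shift/carry/reset finale is the mod-256 negation
theorem crcFinal_eq (c : Int) :
    (if (PySem.Int.floordiv c 256 + 1) * 256 - c = 256 then 0
     else (PySem.Int.floordiv c 256 + 1) * 256 - c) = PySem.Int.mod (-c) 256 := by
  rw [PySem.Int.floordiv_eq_ediv_of_pos (by norm_num : (0:Int) < 256),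
      PySem.Int.mod_eq_emod_of_pos (by norm_num : (0:Int) < 256)]
  split_ifs <;> omega

-- ===== VERDICT (by name: the statement is the Claim_ definition above) =====
theorem read_and_convert_data_hex_file_spec : Claim_equal_read_and_convert_data_hex_file := by
  intro data m step _
  unfold Spec_read_and_convert_data_hex_file
  simp only [read_and_convert_data_hex_file, read_and_convert_data_hex_file_alt]
  rw [PySem.List.foldl_pyRange_zero_pyGetD' data 0
      (fun (st : String × Int) v => (st.1 ++ fmt02X v, st.2 + v)) ("", 0)]
  rw [dataLoop_eq]
  simp only [addr_eq m]
  rw [addrLoop_eq, crcFinal_eq]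
  rw [hexsumB_eq data data.length 0 (data.length : Int) (by omega) (by omega) (by omega) (by omega)]
  simp only [Int.toNat_zero, List.drop_zero, List.take_length]
  simp only [zero_add, String.empty_append]
  have hc : ∀ X Y Z : Int, -(data.sum + step + (X + Y + Z)) = -(data.sum + (step + X + Y + Z)) := by
    intros; ring
  rw [hc]
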